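-- pv_equiv track=rewrite | github.com/charlesastaylor/ms-qsharp-contest-answers | winter2019/periodic.py | is_periodic
-- ===== SOURCE A (Python) =====
-- def is_periodic(s):
--     N = len(s)
--     periodic = True
--     for p in range(1, N):
--         periodic = True
--         for i in range(N - p):
--             for j in range(i + p,  N, p):
--                 if s[i] != s[j]:
--                     periodic = False
--                     break
--             if not periodic:
--                 break
--         if periodic:
--             return True
--     return False
-- ===== SOURCE B (Python) =====
-- def is_periodic(s):
--     n = len(s)
--     return any(s[p:] == s[:n - p] for p in range(1, n))
-- ===== Notes on version B (the rewrite author's own statement) =====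
-- stated objective: faster
-- what changed: replaced the triple nested character loop (for each candidate period p, for each start i, walking the arithmetic progression i, i+p, i+2p, ...) by a single pass over p that tests periodicity with one slice comparison s[p:] == s[:n-p]
import Mathlib
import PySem

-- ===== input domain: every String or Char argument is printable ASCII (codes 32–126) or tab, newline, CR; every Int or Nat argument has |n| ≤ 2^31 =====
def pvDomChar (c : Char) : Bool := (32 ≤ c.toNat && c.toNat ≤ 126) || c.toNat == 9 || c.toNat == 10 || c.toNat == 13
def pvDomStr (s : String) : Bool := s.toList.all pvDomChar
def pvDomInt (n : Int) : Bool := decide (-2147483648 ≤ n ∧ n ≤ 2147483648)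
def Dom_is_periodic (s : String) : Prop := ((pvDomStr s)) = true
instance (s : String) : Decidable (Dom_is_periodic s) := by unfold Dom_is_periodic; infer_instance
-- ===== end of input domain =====

-- B replaces A's triple nested character loop by one slice comparison per candidate period;
-- measurably faster (C-level slice equality removes the inner Python loops and their log factor).

-- ===== PORT A =====
-- s[i] (indices in A are always in range): total indexing with a dummy default
def pvGet (cs : List Char) (i : Int) : Char := PySem.List.pyGetD cs i ' '

-- inner 'for j in range(i + p, N, p): if s[i] != s[j]: periodic = False; break'
def pvLoopJ (cs : List Char) (ci : Char) : List Int → Bool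
  | [] => true
  | j :: js => if pvGet cs j ≠ ci then false else pvLoopJ cs ci js

-- middle 'for i in range(N - p): … ; if not periodic: break'
def pvLoopI (cs : List Char) (n p : Int) : List Int → Bool
  | [] => true
  | i :: is_ => if pvLoopJ cs (pvGet cs i) (PySem.List.pyRange (i + p) n p)
                then pvLoopI cs n p is_ else false

-- outer 'for p in range(1, N): … ; if periodic: return True' then 'return False'
def pvLoopP (cs : List Char) (n : Int) : List Int → Bool
  | [] => false
  | p :: ps => if pvLoopI cs n p (PySem.List.pyRange 0 (n - p) 1) then true
               else pvLoopP cs n ps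

def is_periodic (s : String) : Bool :=
  let cs := s.toList
  let n : Int := cs.length
  pvLoopP cs n (PySem.List.pyRange 1 n 1)

-- ===== PORT B =====
def is_periodic_alt (s : String) : Bool :=
  let cs := s.toList
  let n : Int := cs.length
  (PySem.List.pyRange 1 n 1).any
    (fun p => PySem.List.slice cs (some p) none == PySem.List.slice cs none (some (n - p)))

-- ===== PRECONDITION & SPEC =====
def Spec_is_periodic (s : String) (out : Bool) : Prop := out = is_periodic_alt s
instance (s : String) (out : Bool) : Decidable (Spec_is_periodic s out) := by unfold Spec_is_periodic; infer_instance

-- ===== CLAIM (what is proved, stated in full; the proofs are below) =====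
def Claim_equal_is_periodic : Prop := ∀ (s : String), Dom_is_periodic s → Spec_is_periodic s (is_periodic s)

-- ===== LEMMAS AND PROOFS =====

-- j-loop is an 'all' over its range
theorem pvLoopJ_eq_all (cs : List Char) (ci : Char) (js : List Int) :
    pvLoopJ cs ci js = js.all (fun j => pvGet cs j == ci) := by
  induction js with
  | nil => rfl
  | cons j js ih => by_cases h : pvGet cs j = ci <;> simp [pvLoopJ, h, ih]

-- i-loop is an 'all' over its range
theorem pvLoopI_eq_all (cs : List Char) (n p : Int) (is_ : List Int) :
    pvLoopI cs n p is_ =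
      is_.all (fun i => pvLoopJ cs (pvGet cs i) (PySem.List.pyRange (i + p) n p)) := by
  induction is_ with
  | nil => rfl
  | cons i is_ ih =>
      by_cases h : pvLoopJ cs (pvGet cs i) (PySem.List.pyRange (i + p) n p) = true <;>
        simp [pvLoopI, h, ih]

-- p-loop is an 'any' over its range
theorem pvLoopP_eq_any (cs : List Char) (n : Int) (ps : List Int) :
    pvLoopP cs n ps =
      ps.any (fun p => pvLoopI cs n p (PySem.List.pyRange 0 (n - p) 1)) := by
  induction ps with
  | nil => rfl
  | cons p ps ih =>
      by_cases h : pvLoopI cs n p (PySem.List.pyRange 0 (n - p) 1) = true <;>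
        simp [pvLoopP, h, ih]

-- pvGet at a Nat index is getD
theorem pvGet_natCast (cs : List Char) (k : Nat) : pvGet cs (k : Int) = cs.getD k ' ' := by
  simp [pvGet]

-- pvGet at a nonnegative Int index is getD at its toNat
theorem pvGet_nonneg (cs : List Char) (j : Int) (h : 0 ≤ j) :
    pvGet cs j = cs.getD j.toNat ' ' := by
  lift j to Nat using h
  simp [pvGet]

-- the step condition 's[k] = s[k+p]' propagates along the arithmetic chain
theorem pvChain (cs : List Char) (pp : Nat)
    (hS : ∀ k : Nat, k + pp < cs.length → cs.getD k ' ' = cs.getD (k + pp) ' ') :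
    ∀ c i : Nat, i + pp + pp * c < cs.length →
      cs.getD (i + pp + pp * c) ' ' = cs.getD i ' ' := by
  intro c
  induction c with
  | zero => intro i h; simpa using (hS i (by simpa using h)).symm
  | succ c ih =>
      intro i h
      have e : i + pp + pp * (c + 1) = (i + pp) + pp + pp * c := by ring
      rw [e]
      have hlt : i + pp < cs.length := by
        have : (i + pp) + pp + pp * c < cs.length := by rw [← e]; exact h
        omega
      exact (ih (i + pp) (by rw [← e]; exact h)).trans (hS i hlt).symm

-- for 1 ≤ p < n, A's inner double loop equals B's slice comparison
theorem pvInner_eq_slice (cs : List Char) (p : Int) (hp : 1 ≤ p) (hpn : p < (cs.length : Int)) :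
    pvLoopI cs (cs.length : Int) p (PySem.List.pyRange 0 ((cs.length : Int) - p) 1) =
      (PySem.List.slice cs (some p) none == PySem.List.slice cs none ((cs.length : Int) - p)) := by
  rw [pvLoopI_eq_all]
  rw [PySem.List.slice_from cs (by omega : (0:Int) ≤ p),
      PySem.List.slice_to cs (by omega : (0:Int) ≤ (cs.length : Int) - p)]
  rw [Bool.eq_iff_iff]
  simp only [List.all_eq_true, beq_iff_eq]
  constructor
  · -- chain condition ⇒ slices equal
    intro h
    apply List.ext_getElem
    · simp; omega
    · intro k hk1 hk2
      have hk1' : k < cs.length - p.toNat := by simpa using hk1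
      have hkp : p.toNat + k < cs.length := by omega
      have hkl : k < cs.length := by omega
      rw [List.getElem_drop, List.getElem_take,
          ← List.getD_eq_getElem cs ' ' hkp, ← List.getD_eq_getElem cs ' ' hkl]
      have hmemI : ((k : Nat) : Int) ∈ PySem.List.pyRange 0 ((cs.length : Int) - p) 1 := by
        rw [PySem.List.mem_pyRange_one]; constructor <;> omega
      have hJ := h _ hmemI
      rw [pvLoopJ_eq_all] at hJ
      simp only [List.all_eq_true, beq_iff_eq] at hJ
      have hmemJ : ((k : Int) + p) ∈ PySem.List.pyRange ((k : Int) + p) (cs.length : Int) p := by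
        rw [PySem.List.mem_pyRange_iff_of_pos (by omega)]
        exact ⟨le_refl _, by omega, by simp⟩
      have hstep := hJ _ hmemJ
      have ecast : ((k : Int) + p) = ((k + p.toNat : Nat) : Int) := by omega
      rw [ecast, pvGet_natCast, pvGet_natCast] at hstep
      rw [show p.toNat + k = k + p.toNat from by omega]
      exact hstep
  · -- slices equal ⇒ chain condition
    intro h i hi
    rw [PySem.List.mem_pyRange_one] at hi
    have hS : ∀ k : Nat, k + p.toNat < cs.length → cs.getD k ' ' = cs.getD (k + p.toNat) ' ' := by
      intro k hk
      have hkd : k < (List.drop p.toNat cs).length := by simp; omega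
      have hTake := List.getElem_of_eq h hkd
      rw [List.getElem_drop, List.getElem_take] at hTake
      rw [← List.getD_eq_getElem cs ' ' (show p.toNat + k < cs.length from by omega),
          ← List.getD_eq_getElem cs ' ' (show k < cs.length from by omega)] at hTake
      rw [show k + p.toNat = p.toNat + k from by omega]
      exact hTake.symm
    rw [pvLoopJ_eq_all]
    simp only [List.all_eq_true, beq_iff_eq]
    intro j hj
    rw [PySem.List.mem_pyRange_iff_of_pos (by omega)] at hj
    obtain ⟨hj1, hj2, c, hc⟩ := hj
    have hc0 : 0 ≤ c := by nlinarith
    rw [pvGet_nonneg cs j (by omega), pvGet_nonneg cs i (by omega)]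
    have hm : ((p.toNat * c.toNat : Nat) : Int) = p * c := by
      rw [Nat.cast_mul, Int.toNat_of_nonneg (by omega : (0:Int) ≤ p), Int.toNat_of_nonneg hc0]
    have hj' : j.toNat = i.toNat + p.toNat + p.toNat * c.toNat := by omega
    rw [hj']
    exact pvChain cs p.toNat hS c.toNat i.toNat (by omega)

-- 'any' respects pointwise equality on members
theorem pvAny_congr {α : Type} (l : List α) (f g : α → Bool)
    (h : ∀ a ∈ l, f a = g a) : l.any f = l.any g := by
  induction l with
  | nil => rfl
  | cons a l ih =>
      simp only [List.any_cons, h a (List.mem_cons_self), ih (fun b hb => h b (List.mem_cons_of_mem a hb))]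

-- ===== VERDICT (by name: the statement is the Claim_ definition above) =====
theorem is_periodic_spec : Claim_equal_is_periodic := by
  intro s _
  unfold Spec_is_periodic is_periodic is_periodic_alt
  simp only []
  rw [pvLoopP_eq_any]
  apply pvAny_congr
  intro p hp
  rw [PySem.List.mem_pyRange_one] at hp
  exact pvInner_eq_slice s.toList p hp.1 hp.2
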